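-- pv_equiv track=rewrite | github.com/hafsaelibrahimi/ensae-prog24 | swap_puzzle/solver.py | list_swap
-- ===== SOURCE A (Python) =====
-- def list_swap(a, b, x, y):
--     swap_to_do = []
--     while a != x or b != y:
--         if a < x:
--             swap_to_do.append(((x, y), (x - 1, y)))
--             x -= 1
--         elif a > x:
--             swap_to_do.append(((x, y), (x + 1, y)))
--             x += 1
--         elif b < y:
--             swap_to_do.append(((x, y), (x, y - 1)))
--             y -= 1
--         elif b > y:
--             swap_to_do.append(((x, y), (x, y + 1)))
--             y += 1
--     return swap_to_do
-- ===== SOURCE B (Python) =====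
-- def list_swap(a, b, x, y):
--     # Closed-form: the i-th swap is computed directly from the index i,
--     # no sequential state, no path list.
--     dx = (a > x) - (a < x)
--     dy = (b > y) - (b < y)
--     m = abs(a - x)
--     n = abs(b - y)
--     def edge(i):
--         if i < m:
--             return ((x + i * dx, y), (x + (i + 1) * dx, y))
--         j = i - m
--         return ((a, y + j * dy), (a, y + (j + 1) * dy))
--     return [edge(i) for i in range(m + n)]
-- ===== Notes on version B (the rewrite author's own statement) =====
-- stated objective: alternative
-- what changed: B replaces A's stateful branching while-loop with a closed-form index map: from signs and leg lengths it computes the i-th swap directly as a formula of i and returns [edge(i) for i in range(m+n)], with no mutable position state.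
import Mathlib
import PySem

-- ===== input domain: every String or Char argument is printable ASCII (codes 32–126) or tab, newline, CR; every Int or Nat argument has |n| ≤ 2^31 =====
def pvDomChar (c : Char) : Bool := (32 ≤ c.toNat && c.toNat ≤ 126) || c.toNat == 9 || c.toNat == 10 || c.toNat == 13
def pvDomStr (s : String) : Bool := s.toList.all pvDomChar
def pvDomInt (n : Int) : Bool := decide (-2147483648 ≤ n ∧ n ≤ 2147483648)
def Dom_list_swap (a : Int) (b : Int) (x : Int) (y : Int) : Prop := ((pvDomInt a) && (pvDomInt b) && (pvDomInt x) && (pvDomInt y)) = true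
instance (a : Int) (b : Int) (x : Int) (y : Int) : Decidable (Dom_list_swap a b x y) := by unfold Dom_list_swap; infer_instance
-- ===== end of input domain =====

-- B replaces A's stateful branching while-loop with a closed-form index map (the i-th swap
-- computed directly from i via signs and leg lengths); objective: alternative.


-- ===== PORT A =====
-- literal port of A's while-loop; the Nat fuel is exactly the number of iterations the
-- Python loop performs ((a-x).natAbs + (b-y).natAbs: each pass moves one unit closer),
-- a totality guard only
def listSwapLoop (a : Int) (b : Int) : Nat → Int → Int → List ((Int × Int) × (Int × Int))
  | 0, _, _ => []
  | n + 1, x, y =>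
    if a < x then ((x, y), (x - 1, y)) :: listSwapLoop a b n (x - 1) y
    else if a > x then ((x, y), (x + 1, y)) :: listSwapLoop a b n (x + 1) y
    else if b < y then ((x, y), (x, y - 1)) :: listSwapLoop a b n x (y - 1)
    else ((x, y), (x, y + 1)) :: listSwapLoop a b n x (y + 1)

def list_swap (a : Int) (b : Int) (x : Int) (y : Int) : List ((Int × Int) × (Int × Int)) :=
  listSwapLoop a b ((a - x).natAbs + (b - y).natAbs) x y

-- ===== PORT B =====
-- edge(i) of Source B: the i-th swap as a direct formula of the index i
def edgeB (a b x y : Int) (i : Int) : (Int × Int) × (Int × Int) :=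
  let dx : Int := (if a > x then 1 else 0) - (if a < x then 1 else 0)
  let dy : Int := (if b > y then 1 else 0) - (if b < y then 1 else 0)
  let m : Int := |a - x|
  if i < m then ((x + i * dx, y), (x + (i + 1) * dx, y))
  else ((a, y + (i - m) * dy), (a, y + (i - m + 1) * dy))

def list_swap_alt (a : Int) (b : Int) (x : Int) (y : Int) : List ((Int × Int) × (Int × Int)) :=
  (PySem.List.pyRange 0 (|a - x| + |b - y|) 1).map (edgeB a b x y)

-- ===== PRECONDITION & SPEC =====
def Spec_list_swap (a : Int) (b : Int) (x : Int) (y : Int) (out : List ((Int × Int) × (Int × Int))) : Prop := out = list_swap_alt a b x y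
instance (a : Int) (b : Int) (x : Int) (y : Int) (out : List ((Int × Int) × (Int × Int))) : Decidable (Spec_list_swap a b x y out) := by unfold Spec_list_swap; infer_instance

-- ===== CLAIM (what is proved, stated in full; the proofs are below) =====
def Claim_equal_list_swap : Prop := ∀ (a : Int) (b : Int) (x : Int) (y : Int), Dom_list_swap a b x y → Spec_list_swap a b x y (list_swap a b x y)

-- ===== LEMMAS AND PROOFS =====

-- the comprehension rewritten over List.range, the form the induction uses
theorem alt_eq_range (a b x y : Int) :
    list_swap_alt a b x y =
      (List.range (|a - x| + |b - y|).toNat).map (fun (k : Nat) => edgeB a b x y ((k : Nat) : Int)) := by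
  unfold list_swap_alt
  rw [PySem.List.pyRange_one, List.map_map]
  norm_num

-- shifting the index by one moves the start one step along the path
theorem edgeB_shift_x_lt (a b x y : Int) (h : a < x) (k : Int) (hk : 0 ≤ k) :
    edgeB a b x y (k + 1) = edgeB a b (x - 1) y k := by
  unfold edgeB
  simp only [Int.abs_eq_natAbs, gt_iff_lt]
  split_ifs <;> simp only [Prod.mk.injEq] <;> refine ⟨⟨?_, ?_⟩, ?_, ?_⟩ <;> first | trivial | omega | (norm_num; omega)

theorem edgeB_shift_x_gt (a b x y : Int) (h : x < a) (k : Int) (hk : 0 ≤ k) :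
    edgeB a b x y (k + 1) = edgeB a b (x + 1) y k := by
  unfold edgeB
  simp only [Int.abs_eq_natAbs, gt_iff_lt]
  split_ifs <;> simp only [Prod.mk.injEq] <;> refine ⟨⟨?_, ?_⟩, ?_, ?_⟩ <;> first | trivial | omega | (norm_num; omega)

theorem edgeB_shift_y (a b y : Int) (hy : b ≠ y) (k : Int) (hk : 0 ≤ k)
    (hk2 : k + 1 < ((b - y).natAbs : Int)) :
    edgeB a b a y (k + 1) = edgeB a b a (y + (if b > y then 1 else (-1))) k := by
  unfold edgeB
  simp only [Int.abs_eq_natAbs, gt_iff_lt]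
  split_ifs <;> simp only [Prod.mk.injEq] <;> refine ⟨⟨?_, ?_⟩, ?_, ?_⟩ <;> first | trivial | omega | (norm_num; omega)

theorem map_range_succ_shift {α : Type} (f : Nat → α) (n : Nat) :
    (List.range (n + 1)).map f = f 0 :: (List.range n).map (fun k => f (k + 1)) := by
  rw [List.range_succ_eq_map]
  simp [List.map_map, Function.comp_def]

theorem edgeB_zero_x_lt (a b x y : Int) (h : a < x) :
    edgeB a b x y 0 = ((x, y), (x - 1, y)) := by
  unfold edgeB
  simp only [Int.abs_eq_natAbs, gt_iff_lt]
  split_ifs <;> simp only [Prod.mk.injEq] <;> refine ⟨⟨?_, ?_⟩, ?_, ?_⟩ <;> first | trivial | omega | (norm_num; omega)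

theorem edgeB_zero_x_gt (a b x y : Int) (h : x < a) :
    edgeB a b x y 0 = ((x, y), (x + 1, y)) := by
  unfold edgeB
  simp only [Int.abs_eq_natAbs, gt_iff_lt]
  split_ifs <;> simp only [Prod.mk.injEq] <;> refine ⟨⟨?_, ?_⟩, ?_, ?_⟩ <;> first | trivial | omega | (norm_num; omega)

theorem edgeB_zero_y_lt (a b y : Int) (h : b < y) :
    edgeB a b a y 0 = ((a, y), (a, y - 1)) := by
  unfold edgeB
  simp only [Int.abs_eq_natAbs, gt_iff_lt]
  split_ifs <;> simp only [Prod.mk.injEq] <;> refine ⟨⟨?_, ?_⟩, ?_, ?_⟩ <;> first | trivial | omega | (norm_num; omega)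

theorem edgeB_zero_y_gt (a b y : Int) (h : y < b) :
    edgeB a b a y 0 = ((a, y), (a, y + 1)) := by
  unfold edgeB
  simp only [Int.abs_eq_natAbs, gt_iff_lt]
  split_ifs <;> simp only [Prod.mk.injEq] <;> refine ⟨⟨?_, ?_⟩, ?_, ?_⟩ <;> first | trivial | omega | (norm_num; omega)

theorem listSwapLoop_eq (a b : Int) : ∀ (n : Nat) (x y : Int), n = (a - x).natAbs + (b - y).natAbs →
    listSwapLoop a b n x y = (List.range n).map (fun (k : Nat) => edgeB a b x y ((k : Nat) : Int)) := by
  intro n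
  induction n with
  | zero => intro x y _; simp [listSwapLoop]
  | succ n ih =>
    intro x y hn
    rw [listSwapLoop, map_range_succ_shift (fun (k : Nat) => edgeB a b x y ((k : Nat) : Int)) n]
    by_cases hx : a = x
    · subst hx
      have hy : b ≠ y := by omega
      rcases lt_or_gt_of_ne hy with hlt | hgt
      · rw [if_neg (by omega), if_neg (by omega), if_pos (by omega)]
        rw [show ((0 : Nat) : Int) = (0:Int) from rfl, edgeB_zero_y_lt a b y hlt, ih a (y - 1) (by omega)]
        congr 1
        apply List.map_congr_left
        intro k hkmem
        have hkn : k < n := List.mem_range.mp hkmem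
        have := edgeB_shift_y a b y hy ((k : Nat) : Int) (by omega) (by omega)
        rw [if_neg (by omega), show y + -1 = y - 1 by ring] at this
        rw [show (((k + 1 : Nat)) : Int) = ((k : Nat) : Int) + 1 by push_cast; ring, this]
      · rw [if_neg (by omega), if_neg (by omega), if_neg (by omega)]
        rw [show ((0 : Nat) : Int) = (0:Int) from rfl, edgeB_zero_y_gt a b y hgt, ih a (y + 1) (by omega)]
        congr 1
        apply List.map_congr_left
        intro k hkmem
        have hkn : k < n := List.mem_range.mp hkmem
        have := edgeB_shift_y a b y hy ((k : Nat) : Int) (by omega) (by omega)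
        rw [if_pos (by omega)] at this
        rw [show (((k + 1 : Nat)) : Int) = ((k : Nat) : Int) + 1 by push_cast; ring, this]
    · rcases lt_or_gt_of_ne hx with hlt | hgt
      · rw [if_pos (by omega)]
        rw [show ((0 : Nat) : Int) = (0:Int) from rfl, edgeB_zero_x_lt a b x y hlt, ih (x - 1) y (by omega)]
        congr 1
        apply List.map_congr_left
        intro k _
        rw [show (((k + 1 : Nat)) : Int) = ((k : Nat) : Int) + 1 by push_cast; ring]
        exact (edgeB_shift_x_lt a b x y hlt ((k : Nat) : Int) (by omega)).symm
      · rw [if_neg (by omega), if_pos (by omega)]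
        rw [show ((0 : Nat) : Int) = (0:Int) from rfl, edgeB_zero_x_gt a b x y hgt, ih (x + 1) y (by omega)]
        congr 1
        apply List.map_congr_left
        intro k _
        rw [show (((k + 1 : Nat)) : Int) = ((k : Nat) : Int) + 1 by push_cast; ring]
        exact (edgeB_shift_x_gt a b x y hgt ((k : Nat) : Int) (by omega)).symm

theorem list_swap_eq_alt (a b x y : Int) : list_swap a b x y = list_swap_alt a b x y := by
  rw [alt_eq_range, list_swap, listSwapLoop_eq a b _ x y rfl]
  have h : (|a - x| + |b - y|).toNat = (a - x).natAbs + (b - y).natAbs := by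
    rw [Int.abs_eq_natAbs, Int.abs_eq_natAbs]; omega
  rw [h]

-- ===== VERDICT (by name: the statement is the Claim_ definition above) =====
theorem list_swap_spec : Claim_equal_list_swap := by
  intro a b x y _
  unfold Spec_list_swap
  exact list_swap_eq_alt a b x y
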